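-- pv_equiv track=rewrite | github.com/benbc/recovery | tools/threshold_tuner_kept.py | should_skip_row
-- ===== SOURCE A (Python) =====
-- def should_skip_row(ratings, p, max_c=14):
--     """Check if we should skip to next row (2+ consecutive '5' ratings)."""
--     consecutive_bad = 0
--     for c in range(max_c + 1):
--         r = ratings.get(f"{p},{c}")
--         if r == 5:
--             consecutive_bad += 1
--             if consecutive_bad >= 2:
--                 return True
--         else:
--             consecutive_bad = 0
--     return False
-- ===== SOURCE B (Python) =====
-- def should_skip_row(ratings, p, max_c=14):
--     """Check if we should skip to next row (2+ consecutive '5' ratings)."""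
--     bad = {c for c in range(max_c + 1) if ratings.get(f"{p},{c}") == 5}
--     return not bad.isdisjoint({c + 1 for c in bad})
-- ===== Notes on version B (the rewrite author's own statement) =====
-- stated objective: alternative
-- what changed: Replaces A's sequential running-counter state machine with a set-based formulation: build the set of columns rated 5, then test whether it intersects its own shift by +1 (disjointness test), which holds exactly when two consecutive columns are rated 5.
import Mathlib
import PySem

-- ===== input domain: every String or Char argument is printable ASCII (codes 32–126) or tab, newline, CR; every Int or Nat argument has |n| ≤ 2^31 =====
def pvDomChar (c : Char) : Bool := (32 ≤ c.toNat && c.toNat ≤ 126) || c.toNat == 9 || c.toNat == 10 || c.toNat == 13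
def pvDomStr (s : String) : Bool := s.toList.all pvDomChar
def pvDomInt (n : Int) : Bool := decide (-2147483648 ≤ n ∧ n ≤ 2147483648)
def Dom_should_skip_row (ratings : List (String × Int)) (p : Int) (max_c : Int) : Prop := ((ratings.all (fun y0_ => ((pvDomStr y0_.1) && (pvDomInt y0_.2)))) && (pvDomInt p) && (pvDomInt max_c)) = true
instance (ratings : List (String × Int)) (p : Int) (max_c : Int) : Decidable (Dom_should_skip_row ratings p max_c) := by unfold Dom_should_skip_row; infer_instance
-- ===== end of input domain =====

-- ===== PORT A =====
-- B replaces A's running-counter state machine with a set formulation (objective: alternative): the set of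
-- columns rated 5 intersects its shift by +1 exactly when two consecutive columns are rated 5.
def pvKey (p c : Int) : String := PySem.Int.toStr p ++ "," ++ PySem.Int.toStr c

def pvF (ratings : List (String × Int)) (p c : Int) : Option Int :=
  PySem.Dict.get? (PySem.Dict.mk ratings) (pvKey p c)

def pvALoop (ratings : List (String × Int)) (p : Int) : List Int → Int → Bool
  | [], _ => false
  | c :: rest, consecutive_bad =>
    if pvF ratings p c == some (5 : Int) then
      if consecutive_bad + 1 ≥ 2 then true else pvALoop ratings p rest (consecutive_bad + 1)
    else pvALoop ratings p rest 0

def should_skip_row (ratings : List (String × Int)) (p : Int) (max_c : Int) : Bool :=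
  pvALoop ratings p (PySem.List.pyRange 0 (max_c + 1) 1) 0

-- ===== PORT B =====
def should_skip_row_alt (ratings : List (String × Int)) (p : Int) (max_c : Int) : Bool :=
  let bad : PySem.Set Int := PySem.Set.ofList
    ((PySem.List.pyRange 0 (max_c + 1) 1).filter (fun c => pvF ratings p c == some (5 : Int)))
  let shifted : PySem.Set Int := PySem.Set.ofList (bad.map (fun c => c + 1))
  !(PySem.Set.isdisjoint bad shifted)

-- ===== PRECONDITION & SPEC =====
def Spec_should_skip_row (ratings : List (String × Int)) (p : Int) (max_c : Int) (out : Bool) : Prop := out = should_skip_row_alt ratings p max_c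
instance (ratings : List (String × Int)) (p : Int) (max_c : Int) (out : Bool) : Decidable (Spec_should_skip_row ratings p max_c out) := by unfold Spec_should_skip_row; infer_instance

-- ===== CLAIM (what is proved, stated in full; the proofs are below) =====
def Claim_equal_should_skip_row : Prop := ∀ (ratings : List (String × Int)) (p : Int) (max_c : Int), Dom_should_skip_row ratings p max_c → Spec_should_skip_row ratings p max_c (should_skip_row ratings p max_c)

-- ===== LEMMAS AND PROOFS =====
-- Shared characterization: both ports are true iff some pair of consecutive in-range columns maps to 5.
def pvPair (ratings : List (String × Int)) (p a b : Int) : Prop :=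
  ∃ c, a ≤ c ∧ c + 1 < b ∧ pvF ratings p c = some 5 ∧ pvF ratings p (c + 1) = some 5

theorem pv_aloop_iff (ratings : List (String × Int)) (p : Int) :
    ∀ (n : Nat) (a k : Int), 0 ≤ k →
      (pvALoop ratings p (PySem.List.pyRange a (a + n) 1) k = true ↔
        pvPair ratings p a (a + n) ∨ (1 ≤ k ∧ 0 < (n : Int) ∧ pvF ratings p a = some 5)) := by
  intro n
  induction n with
  | zero =>
    intro a k hk
    rw [PySem.List.pyRange_one_eq_nil (by omega)]
    simp only [pvALoop, pvPair]
    constructor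
    · intro h; exact absurd h (by simp)
    · rintro (⟨c, h1, h2, _⟩ | ⟨_, h, _⟩) <;> omega
  | succ m ih =>
    intro a k hk
    rw [PySem.List.pyRange_one_cons (by push_cast; omega)]
    have hrange : a + 1 + (m : Int) = a + ((m : Nat) + 1 : Nat) := by push_cast; ring
    simp only [pvALoop]
    by_cases h5 : pvF ratings p a = some 5
    · have hb : (pvF ratings p a == some (5 : Int)) = true := by simp [h5]
      simp only [hb, if_true]
      by_cases hk1 : 1 ≤ k
      · rw [if_pos (show k + 1 ≥ 2 by omega)]
        constructor
        · intro _
          right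
          exact ⟨hk1, by push_cast; omega, h5⟩
        · intro _; rfl
      · have hk0 : k = 0 := by omega
        subst hk0
        rw [if_neg (show ¬ ((0:Int) + 1 ≥ 2) by omega)]
        simp only [zero_add]
        have hih := ih (a + 1) 1 (by omega)
        rw [hrange] at hih
        rw [hih]
        constructor
        · rintro (⟨c, hc1, hc2, hc3, hc4⟩ | ⟨_, hm, hfa1⟩)
          · left; exact ⟨c, by omega, by push_cast at hc2 ⊢; omega, hc3, hc4⟩
          · left; exact ⟨a, le_refl a, by push_cast at hm ⊢; omega, h5, hfa1⟩
        · rintro (⟨c, hc1, hc2, hc3, hc4⟩ | ⟨hk', _, _⟩)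
          · by_cases hca : c = a
            · subst hca
              right
              refine ⟨le_refl 1, ?_, hc4⟩
              push_cast at hc2 ⊢; omega
            · left
              exact ⟨c, by omega, by push_cast at hc2 ⊢; omega, hc3, hc4⟩
          · omega
    · have hb : (pvF ratings p a == some (5 : Int)) = false := by simp [h5]
      simp only [hb, Bool.false_eq_true, if_false]
      have hih := ih (a + 1) 0 le_rfl
      rw [hrange] at hih
      rw [hih]
      constructor
      · rintro (⟨c, hc1, hc2, hc3, hc4⟩ | ⟨h1, _, _⟩)
        · left; exact ⟨c, by omega, by push_cast at hc2 ⊢; omega, hc3, hc4⟩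
        · omega
      · rintro (⟨c, hc1, hc2, hc3, hc4⟩ | ⟨_, _, hfa⟩)
        · by_cases hca : c = a
          · subst hca; exact absurd hc3 h5
          · left; exact ⟨c, by omega, by push_cast at hc2 ⊢; omega, hc3, hc4⟩
        · exact absurd hfa h5

theorem pv_a_iff (ratings : List (String × Int)) (p max_c : Int) :
    should_skip_row ratings p max_c = true ↔ pvPair ratings p 0 (max_c + 1) := by
  unfold should_skip_row
  by_cases h : 0 ≤ max_c + 1
  · have hn : (0 : Int) + ((max_c + 1).toNat : Int) = max_c + 1 := by omega
    have := pv_aloop_iff ratings p (max_c + 1).toNat 0 0 le_rfl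
    rw [hn] at this
    rw [this]
    constructor
    · rintro (hp | ⟨hk, _, _⟩)
      · exact hp
      · omega
    · intro hp; exact Or.inl hp
  · rw [PySem.List.pyRange_one_eq_nil (by omega)]
    simp only [pvALoop, pvPair]
    constructor
    · intro hh; exact absurd hh (by simp)
    · rintro ⟨c, h1, h2, _⟩; omega

theorem pv_b_iff (ratings : List (String × Int)) (p max_c : Int) :
    should_skip_row_alt ratings p max_c = true ↔ pvPair ratings p 0 (max_c + 1) := by
  unfold should_skip_row_alt
  simp only [PySem.Set.isdisjoint, Bool.not_not, List.any_eq_true]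
  constructor
  · rintro ⟨x, hx, hxs⟩
    have hx' : x ∈ (PySem.List.pyRange 0 (max_c + 1) 1).filter
        (fun c => pvF ratings p c == some (5 : Int)) := (PySem.Set.mem_ofList _ _).mp hx
    rw [List.mem_filter] at hx'
    have hxs' : x ∈ (PySem.Set.ofList
        ((PySem.List.pyRange 0 (max_c + 1) 1).filter
          (fun c => pvF ratings p c == some (5 : Int)))).map (fun c => c + 1) := by
      have := (PySem.Set.mem_ofList _ x).mp ((List.contains_iff_mem).mp hxs)
      exact this
    rw [List.mem_map] at hxs'
    obtain ⟨d, hd, hdx⟩ := hxs'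
    have hd' := (PySem.Set.mem_ofList _ _).mp hd
    rw [List.mem_filter] at hd'
    refine ⟨d, ?_, ?_, by simpa using hd'.2, ?_⟩
    · exact ((PySem.List.mem_pyRange_one).mp hd'.1).1
    · have := (PySem.List.mem_pyRange_one).mp hx'.1
      omega
    · rw [hdx]; simpa using hx'.2
  · rintro ⟨c, hc1, hc2, hc3, hc4⟩
    refine ⟨c + 1, ?_, ?_⟩
    · apply (PySem.Set.mem_ofList _ _).mpr
      rw [List.mem_filter]
      exact ⟨(PySem.List.mem_pyRange_one).mpr ⟨by omega, hc2⟩, by simp [hc4]⟩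
    · apply List.contains_iff_mem.mpr
      apply (PySem.Set.mem_ofList _ _).mpr
      rw [List.mem_map]
      refine ⟨c, ?_, rfl⟩
      apply (PySem.Set.mem_ofList _ _).mpr
      rw [List.mem_filter]
      exact ⟨(PySem.List.mem_pyRange_one).mpr ⟨hc1, by omega⟩, by simp [hc3]⟩

-- ===== VERDICT (by name: the statement is the Claim_ definition above) =====
theorem should_skip_row_spec : Claim_equal_should_skip_row := by
  intro ratings p max_c _
  unfold Spec_should_skip_row
  rw [Bool.eq_iff_iff, pv_a_iff, pv_b_iff]
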